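-- pv_equiv track=rewrite | github.com/MrBrantCode/unitest_baseline | mut_generate/mist_train_taco/taco_19339/solution.py | count_palindromic_strings
-- ===== SOURCE A (Python) =====
-- def count_palindromic_strings(N: int, K: int) -> int:
--     mod = 1000000007
--
--     def rec(N, K, dp):
--         if N == 0:
--             return 1
--         if K == 0:
--             return 0
--         if N == 1:
--             return K
--         if dp[N][K] != -1:
--             return dp[N][K]
--         dp[N][K] = rec(N - 2, K - 1, dp) * K
--         return dp[N][K]
--
--     dp = [[-1 for _ in range(K + 1)] for _ in range(N + 1)]
--     count = 0
--     for i in range(1, N + 1):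
--         count += rec(i, K, dp)
--     return count % mod
-- ===== SOURCE B (Python) =====
-- def count_palindromic_strings(N: int, K: int) -> int:
--     # one pass: keep running falling-factorial products for odd/even lengths
--     mod = 1000000007
--     total = 0
--     podd = K    # count for the next odd length
--     peven = K   # count for the next even length
--     for i in range(1, N + 1):
--         if i % 2 == 1:
--             total += podd
--             podd *= K - (i + 1) // 2
--         else:
--             total += peven
--             peven *= K - i // 2
--     return total % mod
-- ===== Notes on version B (the rewrite author's own statement) =====
-- stated objective: faster
-- what changed: Replaced the memoized recursion over an (N+1)x(K+1) table (re-deriving each length's falling factorial from scratch) by a single O(N) pass that maintains two running products (for odd and for even lengths) and accumulates the sum; Pre_ excludes only N>=2 with K<0, where A raises (IndexError on the empty dp rows).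
import Mathlib
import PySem

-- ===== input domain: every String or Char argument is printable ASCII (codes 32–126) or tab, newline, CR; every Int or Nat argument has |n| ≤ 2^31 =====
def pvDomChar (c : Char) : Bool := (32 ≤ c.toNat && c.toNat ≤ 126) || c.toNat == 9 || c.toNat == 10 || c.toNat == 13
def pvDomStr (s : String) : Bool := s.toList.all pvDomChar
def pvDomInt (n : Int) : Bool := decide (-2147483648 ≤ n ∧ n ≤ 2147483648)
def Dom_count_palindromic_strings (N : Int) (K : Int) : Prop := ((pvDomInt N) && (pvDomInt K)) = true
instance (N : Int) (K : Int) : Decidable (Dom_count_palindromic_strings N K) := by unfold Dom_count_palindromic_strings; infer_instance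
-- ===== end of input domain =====

-- B replaces A's memoized recursion over an (N+1)x(K+1) table by a single pass with two
-- running falling-factorial products (odd/even lengths); objective: faster.

-- ===== PORT A =====
-- dp[N][K] lookup; -1 as default: every lookup actually reached inside Pre_ has
-- nonnegative in-range indices (Python would raise IndexError otherwise — excluded by Pre_)
def pvLookup (dp : List (List Int)) (n k : Int) : Int :=
  (((PySem.List.pyGet? dp n).bind (fun row => PySem.List.pyGet? row k)).getD (-1))

-- dp[N][K] = v; indices are nonnegative and in range at every reached call inside Pre_
def pvStore (dp : List (List Int)) (n k v : Int) : List (List Int) :=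
  dp.set n.toNat ((dp.getD n.toNat []).set k.toNat v)

-- 'def rec(N, K, dp)': fuel bounds the recursion depth (N drops by 2 each call, so the
-- caller's i.toNat is always enough); the fuel-0 branch is never reached inside Pre_
def pvRec (fuel : Nat) (n k : Int) (dp : List (List Int)) : Int × List (List Int) :=
  if n = 0 then (1, dp)
  else if k = 0 then (0, dp)
  else if n = 1 then (k, dp)
  else if pvLookup dp n k ≠ -1 then (pvLookup dp n k, dp)
  else match fuel with
    | 0 => (0, dp)
    | fuel' + 1 =>
      let r := pvRec fuel' (n - 2) (k - 1) dp
      let v := r.1 * k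
      (v, pvStore r.2 n k v)

-- body of 'for i in range(1, N + 1): count += rec(i, K, dp)'
def pvAStep (K : Int) (st : Int × List (List Int)) (i : Int) : Int × List (List Int) :=
  let r := pvRec i.toNat i K st.2
  (st.1 + r.1, r.2)

def count_palindromic_strings (N : Int) (K : Int) : Int :=
  PySem.Int.mod
    (((PySem.List.pyRange 1 (N + 1) 1).foldl (pvAStep K)
      (0, List.replicate (N + 1).toNat (List.replicate (K + 1).toNat (-1)))).1)
    1000000007

-- ===== PORT B =====
-- loop body; state (total, podd, peven): running sum and the falling-factorial
-- products for the next odd and next even length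
def pvBStep (K : Int) (st : Int × Int × Int) (i : Int) : Int × Int × Int :=
  if PySem.Int.mod i 2 = 1 then
    (st.1 + st.2.1, st.2.1 * (K - PySem.Int.floordiv (i + 1) 2), st.2.2)
  else
    (st.1 + st.2.2, st.2.1, st.2.2 * (K - PySem.Int.floordiv i 2))

def count_palindromic_strings_alt (N : Int) (K : Int) : Int :=
  PySem.Int.mod (((PySem.List.pyRange 1 (N + 1) 1).foldl (pvBStep K) (0, K, K)).1) 1000000007

-- ===== PRECONDITION & SPEC =====
-- Pre_ excludes exactly the inputs on which A raises: for N ≥ 2 and K < 0 the dp rows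
-- are empty and dp[N][K] raises IndexError (A returns normally everywhere else).
def Pre_count_palindromic_strings (N : Int) (K : Int) : Prop := N ≤ 1 ∨ 0 ≤ K
instance (N : Int) (K : Int) : Decidable (Pre_count_palindromic_strings N K) := by
  unfold Pre_count_palindromic_strings; infer_instance

def pvWitness_count_palindromic_strings : Int × Int := (5, 3)

def Spec_count_palindromic_strings (N : Int) (K : Int) (out : Int) : Prop := out = count_palindromic_strings_alt N K
instance (N : Int) (K : Int) (out : Int) : Decidable (Spec_count_palindromic_strings N K out) := by unfold Spec_count_palindromic_strings; infer_instance

-- ===== CLAIM (what is proved, stated in full; the proofs are below) =====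
def Claim_equal_count_palindromic_strings : Prop := ∀ (N : Int) (K : Int), Dom_count_palindromic_strings N K → Pre_count_palindromic_strings N K → Spec_count_palindromic_strings N K (count_palindromic_strings N K)

-- ===== LEMMAS AND PROOFS =====

-- the value rec(n, k, dp) computes (the dp cache only memoizes this value)
def pvG : Nat → Int → Int
  | 0, _ => 1
  | 1, k => k
  | (n + 2), k => if k = 0 then 0 else pvG n (k - 1) * k

-- falling factorial: pvProdK K c = K * (K-1) * … * (K-c+1)
def pvProdK (K : Int) : Nat → Int
  | 0 => 1
  | c + 1 => pvProdK K c * (K - (c : Int))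

-- B's per-length count: pvP K n = pvProdK K ⌈n/2⌉
def pvP (K : Int) (n : Nat) : Int := pvProdK K ((n + 1) / 2)

def pvSumG (K : Int) : Nat → Int
  | 0 => 0
  | m + 1 => pvSumG K m + pvG (m + 1) K

def pvSumP (K : Int) : Nat → Int
  | 0 => 0
  | m + 1 => pvSumP K m + pvP K (m + 1)

-- Nat-index view of pvLookup
def pvLkN (dp : List (List Int)) (a b : Nat) : Int :=
  ((dp[a]?).bind (fun row => row[b]?)).getD (-1)

-- dp-cache invariant: every non-(-1) entry is the memoized value
def pvGood (dp : List (List Int)) : Prop :=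
  ∀ a b : Nat, pvLkN dp a b ≠ -1 → pvLkN dp a b = pvG a (b : Int)

theorem pvLookup_nonneg (dp : List (List Int)) (n k : Int) (hn : 0 ≤ n) (hk : 0 ≤ k) :
    pvLookup dp n k = pvLkN dp n.toNat k.toNat := by
  unfold pvLookup pvLkN
  rw [PySem.List.pyGet?_of_nonneg dp hn]
  cases dp[n.toNat]? with
  | none => rfl
  | some row => simp only [Option.bind_some]; rw [PySem.List.pyGet?_of_nonneg row hk]

theorem pvLkN_store (dp : List (List Int)) (n k : Nat) (v : Int) (a b : Nat) :
    pvLkN (dp.set n ((dp.getD n []).set k v)) a b = pvLkN dp a b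
    ∨ (a = n ∧ b = k ∧ pvLkN (dp.set n ((dp.getD n []).set k v)) a b = v) := by
  by_cases ha : a = n
  · subst ha
    by_cases hn : a < dp.length
    · have hrow : dp.getD a [] = dp[a] := List.getD_eq_getElem dp [] hn
      have hset : (dp.set a ((dp.getD a []).set k v))[a]? = some ((dp.getD a []).set k v) :=
        List.getElem?_set_self hn
      by_cases hb : b = k
      · subst hb
        by_cases hk : b < (dp.getD a []).length
        · right
          refine ⟨rfl, rfl, ?_⟩
          unfold pvLkN
          rw [hset]
          simp only [Option.bind_some]
          rw [List.getElem?_set_self hk]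
          rfl
        · left
          unfold pvLkN
          rw [hset, List.getElem?_eq_getElem hn]
          simp only [Option.bind_some]
          have h1 : ((dp.getD a []).set b v)[b]? = none :=
            List.getElem?_eq_none (by rw [List.length_set]; omega)
          have h2 : (dp[a] : List Int)[b]? = none :=
            List.getElem?_eq_none (by rw [← hrow]; omega)
          rw [h1, h2]
      · left
        unfold pvLkN
        rw [hset, List.getElem?_eq_getElem hn]
        simp only [Option.bind_some]
        rw [List.getElem?_set_ne (by omega), hrow]
    · left
      unfold pvLkN
      rw [List.getElem?_eq_none (by rw [List.length_set]; omega),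
          List.getElem?_eq_none (by omega)]
  · left
    unfold pvLkN
    rw [List.getElem?_set_ne (by omega)]

theorem pvG_zero (n : Nat) (h : 1 ≤ n) : pvG n 0 = 0 := by
  match n, h with
  | 1, _ => rfl
  | (m + 2), _ => simp [pvG]

theorem pvGood_store (dp : List (List Int)) (n k : Int) (hk : 1 ≤ k)
    (hg : pvGood dp) : pvGood (pvStore dp n k (pvG n.toNat k)) := by
  intro a b hne
  unfold pvStore at *
  rcases pvLkN_store dp n.toNat k.toNat (pvG n.toNat k) a b with h | ⟨ha, hb, hv⟩
  · rw [h] at hne ⊢; exact hg a b hne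
  · subst ha; subst hb
    rw [hv]
    congr 1
    omega

theorem pvRec_correct (fuel : Nat) : ∀ (n k : Int) (dp : List (List Int)),
    0 ≤ n → n.toNat ≤ 2 * fuel + 1 → (0 ≤ k ∨ n ≤ 1) → pvGood dp →
    (pvRec fuel n k dp).1 = pvG n.toNat k ∧ pvGood (pvRec fuel n k dp).2 := by
  induction fuel with
  | zero =>
    intro n k dp hn hf hk hg
    unfold pvRec
    by_cases h0 : n = 0
    · subst h0; simpa [pvG] using hg
    by_cases hk0 : k = 0
    · subst hk0
      simp only [if_neg h0, reduceIte]
      exact ⟨(pvG_zero n.toNat (by omega)).symm, hg⟩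
    by_cases h1 : n = 1
    · subst h1; simpa [pvG, hk0] using hg
    · exfalso; omega
  | succ f ih =>
    intro n k dp hn hf hk hg
    unfold pvRec
    by_cases h0 : n = 0
    · subst h0; simpa [pvG] using hg
    by_cases hk0 : k = 0
    · subst hk0
      simp only [if_neg h0, reduceIte]
      exact ⟨(pvG_zero n.toNat (by omega)).symm, hg⟩
    by_cases h1 : n = 1
    · subst h1; simpa [pvG, hk0] using hg
    have hn2 : 2 ≤ n := by omega
    have hk1 : 1 ≤ k := by rcases hk with h | h; omega; omega
    by_cases hc : pvLookup dp n k ≠ -1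
    · simp only [if_neg h0, if_neg hk0, if_neg h1, if_pos hc]
      have hl := pvLookup_nonneg dp n k (by omega) (by omega)
      have := hg n.toNat k.toNat (by rwa [hl] at hc)
      constructor
      · rw [hl, this]; congr 1; omega
      · exact hg
    · simp only [if_neg h0, if_neg hk0, if_neg h1, if_neg hc]
      obtain ⟨hr1, hr2⟩ := ih (n - 2) (k - 1) dp (by omega) (by omega) (Or.inl (by omega)) hg
      have hstep : pvG (n - 2).toNat (k - 1) * k = pvG n.toNat k := by
        have hnn : n.toNat = (n - 2).toNat + 2 := by omega
        rw [hnn, pvG, if_neg hk0]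
      constructor
      · rw [hr1, hstep]
      · rw [hr1, hstep]
        exact pvGood_store _ n k hk1 hr2

theorem pvGood_init (a b : Nat) :
    pvGood (List.replicate a (List.replicate b (-1 : Int))) := by
  intro i j h
  exfalso; apply h
  unfold pvLkN
  rw [List.getElem?_replicate]
  by_cases hi : i < a
  · simp only [if_pos hi, Option.bind_some, List.getElem?_replicate]
    by_cases hj : j < b
    · simp [hj]
    · simp [hj]
  · simp [hi]

theorem pvA_fold (K : Int) : ∀ (m : Nat), (0 ≤ K ∨ m ≤ 1) → ∀ (c : Int) (dp : List (List Int)),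
    pvGood dp →
    (((List.range m).map (fun j => (1 : Int) + (j : Nat))).foldl (pvAStep K) (c, dp)).1
        = c + pvSumG K m
    ∧ pvGood ((((List.range m).map (fun j => (1 : Int) + (j : Nat))).foldl (pvAStep K) (c, dp)).2) := by
  intro m
  induction m with
  | zero => intro _ c dp hg; simpa [pvSumG] using hg
  | succ m ihm =>
    intro hk c dp hg
    obtain ⟨h1, h2⟩ := ihm (by omega) c dp hg
    rw [List.range_succ, List.map_append, List.foldl_append]
    simp only [List.map_cons, List.map_nil, List.foldl_cons, List.foldl_nil]
    set s := ((List.range m).map (fun j => (1 : Int) + (j : Nat))).foldl (pvAStep K) (c, dp) with hs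
    have hnn : ((1 : Int) + (m : Nat)).toNat = m + 1 := by omega
    obtain ⟨hr1, hr2⟩ := pvRec_correct (((1 : Int) + (m : Nat)).toNat) ((1 : Int) + (m : Nat)) K s.2
      (by omega) (by omega)
      (hk.imp (fun h => h) (fun h => by omega)) h2
    unfold pvAStep
    constructor
    · simp only []
      rw [hr1, h1, hnn, pvSumG]
      ring
    · simpa using hr2

theorem pvProdK_succ_left (K : Int) (c : Nat) :
    pvProdK K (c + 1) = K * pvProdK (K - 1) c := by
  induction c with
  | zero => simp [pvProdK]
  | succ c ih =>
    calc pvProdK K (c + 1 + 1) = pvProdK K (c + 1) * (K - ((c : Int) + 1)) := by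
          rw [pvProdK]; push_cast; ring_nf
    _ = K * (pvProdK (K - 1) c * ((K - 1) - (c : Int))) := by rw [ih]; ring
    _ = K * pvProdK (K - 1) (c + 1) := by rw [pvProdK]

theorem pvB_fold (K : Int) (m : Nat) :
    ((List.range m).map (fun j => (1 : Int) + (j : Nat))).foldl (pvBStep K) (0, K, K)
      = (pvSumP K m,
         pvP K (if m % 2 = 1 then m + 2 else m + 1),
         pvP K (if m % 2 = 0 then m + 2 else m + 1)) := by
  induction m with
  | zero =>
    simp [pvSumP, pvP, pvProdK]
  | succ m ih =>
    rw [List.range_succ, List.map_append, List.foldl_append]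
    simp only [List.map_cons, List.map_nil, List.foldl_cons, List.foldl_nil]
    rw [ih]
    have hcast : (1 : Int) + (m : Nat) = ((m + 1 : Nat) : Int) := by push_cast; ring
    have hmod : PySem.Int.mod ((1 : Int) + (m : Nat)) 2 = (((m + 1) % 2 : Nat) : Int) := by
      rw [hcast]; exact_mod_cast PySem.Int.mod_natCast (m + 1) 2
    by_cases hp : (m + 1) % 2 = 1
    · have hme : m % 2 = 0 := by omega
      rw [show (if m % 2 = 1 then m + 2 else m + 1) = m + 1 from if_neg (by omega),
          show (if m % 2 = 0 then m + 2 else m + 1) = m + 2 from if_pos hme,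
          show (if (m + 1) % 2 = 1 then m + 1 + 2 else m + 1 + 1) = m + 3 from by
            rw [if_pos hp],
          show (if (m + 1) % 2 = 0 then m + 1 + 2 else m + 1 + 1) = m + 2 from by
            rw [if_neg (by omega)]]
      unfold pvBStep
      rw [hmod, hp]
      rw [if_pos (by norm_num : (((1 : Nat) : Int)) = 1)]
      have hfd : PySem.Int.floordiv ((1 : Int) + (m : Nat) + 1) 2 = (((m + 2) / 2 : Nat) : Int) := by
        have h4 : (1 : Int) + (m : Nat) + 1 = ((m + 2 : Nat) : Int) := by push_cast; ring
        rw [h4]; exact_mod_cast PySem.Int.floordiv_natCast (m + 2) 2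
      refine Prod.ext rfl (Prod.ext ?_ rfl)
      show pvP K (m + 1) * (K - PySem.Int.floordiv ((1 : Int) + (m : Nat) + 1) 2) = pvP K (m + 3)
      rw [hfd]
      unfold pvP
      have h2 : (m + 3 + 1) / 2 = (m + 1 + 1) / 2 + 1 := by omega
      rw [h2, pvProdK]
    · have hme : m % 2 = 1 := by omega
      have hp0 : (m + 1) % 2 = 0 := by omega
      rw [show (if m % 2 = 1 then m + 2 else m + 1) = m + 2 from if_pos hme,
          show (if m % 2 = 0 then m + 2 else m + 1) = m + 1 from if_neg (by omega),
          show (if (m + 1) % 2 = 1 then m + 1 + 2 else m + 1 + 1) = m + 2 from by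
            rw [if_neg (by omega)],
          show (if (m + 1) % 2 = 0 then m + 1 + 2 else m + 1 + 1) = m + 3 from by
            rw [if_pos hp0]]
      unfold pvBStep
      rw [hmod, hp0]
      rw [if_neg (by norm_num : ¬ (((0 : Nat) : Int)) = 1)]
      have hfd : PySem.Int.floordiv ((1 : Int) + (m : Nat)) 2 = (((m + 1) / 2 : Nat) : Int) := by
        rw [hcast]; exact_mod_cast PySem.Int.floordiv_natCast (m + 1) 2
      refine Prod.ext rfl (Prod.ext rfl ?_)
      show pvP K (m + 1) * (K - PySem.Int.floordiv ((1 : Int) + (m : Nat)) 2) = pvP K (m + 3)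
      rw [hfd]
      unfold pvP
      have h2 : (m + 3 + 1) / 2 = (m + 1 + 1) / 2 + 1 := by omega
      rw [h2, pvProdK]
      have h3 : (m + 1 + 1) / 2 = (m + 1) / 2 := by omega
      rw [h3]

theorem pvG_eq_pvP : ∀ (n : Nat) (K : Int), (0 ≤ K ∨ n ≤ 1) → pvG n K = pvP K n
  | 0, K, _ => by simp [pvG, pvP, pvProdK]
  | 1, K, _ => by simp [pvG, pvP, pvProdK]
  | (n + 2), K, h => by
    have hK : 0 ≤ K := by rcases h with h | h; exact h; omega
    have hsplit : (n + 2 + 1) / 2 = (n + 1) / 2 + 1 := by omega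
    rw [pvG]
    by_cases hK0 : K = 0
    · subst hK0
      rw [if_pos rfl]
      unfold pvP
      rw [hsplit, pvProdK_succ_left]
      ring
    · rw [if_neg hK0, pvG_eq_pvP n (K - 1) (Or.inl (by omega))]
      unfold pvP
      rw [hsplit, pvProdK_succ_left]
      ring

theorem pvSumG_eq_pvSumP (K : Int) (m : Nat) (h : 0 ≤ K ∨ m ≤ 1) :
    pvSumG K m = pvSumP K m := by
  induction m with
  | zero => rfl
  | succ m ih =>
    rw [pvSumG, pvSumP, ih (by omega), pvG_eq_pvP (m + 1) K (by omega)]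

theorem pvRange_eq (m : Nat) :
    PySem.List.pyRange 1 ((m : Int) + 1) 1 = (List.range m).map (fun j => (1 : Int) + (j : Nat)) := by
  rw [PySem.List.pyRange_one]
  have h : ((m : Int) + 1 - 1).toNat = m := by omega
  rw [h]

-- ===== VERDICT (by name: the statement is the Claim_ definition above) =====
theorem count_palindromic_strings_spec : Claim_equal_count_palindromic_strings := by
  intro N K _ hpre
  unfold Spec_count_palindromic_strings count_palindromic_strings count_palindromic_strings_alt
  by_cases hN : N < 1
  · have h0 : PySem.List.pyRange 1 (N + 1) 1 = [] := by
      rw [PySem.List.pyRange_one]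
      have h1 : (N + 1 - 1).toNat = 0 := by omega
      rw [h1]
      simp
    rw [h0]
    rfl
  · have hm : N + 1 = ((N.toNat : Int)) + 1 := by omega
    set m := N.toNat with hmdef
    rw [hm, pvRange_eq m]
    have hpre' : (0 ≤ K ∨ m ≤ 1) := by
      rcases hpre with h | h
      · right; omega
      · left; exact h
    obtain ⟨hA, -⟩ := pvA_fold K m hpre' 0
      (List.replicate (((m : Int)) + 1).toNat (List.replicate (K + 1).toNat (-1))) (pvGood_init _ _)
    rw [hA, pvB_fold K m, pvSumG_eq_pvSumP K m hpre']
    norm_num
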